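-- pv_equiv track=rewrite | github.com/Audio-WestlakeU/RealMAN | baselines/SSL/run_tasks.py | new_task_added
-- ===== SOURCE A (Python) =====
-- from typing import Any, Dict, List, Optional, Set, Tuple, Union
--
-- def new_task_added(old_tasks: List[Dict[str, Any]], new_tasks: List[Dict[str, Any]]) -> bool:
--     old_task_ids = [task['task_file'] for task in old_tasks]
--     new_task_ids = [task['task_file'] for task in new_tasks]
--     added = set(new_task_ids) - set(old_task_ids)
--     if len(added) > 0:
--         return True
--     else:
--         return False
-- ===== SOURCE B (Python) =====
-- from typing import Any, Dict, List
--
-- def new_task_added(old_tasks: List[Dict[str, Any]], new_tasks: List[Dict[str, Any]]) -> bool: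
--     old_ids = sorted(task['task_file'] for task in old_tasks)
--     new_ids = sorted(task['task_file'] for task in new_tasks)
--     i = 0
--     for nid in new_ids:
--         while i < len(old_ids) and old_ids[i] < nid:
--             i += 1
--         if i == len(old_ids) or old_ids[i] != nid:
--             return True
--     return False
-- ===== Notes on version B (the rewrite author's own statement) =====
-- stated objective: alternative
-- what changed: Replaces A's build-two-sets-and-test-set-difference-emptiness by sorting both id lists and running a two-pointer merge scan that returns True at the first new id with no match in the sorted old ids.
-- outside the precondition, e.g. on new_task_added([{}], []): A raises KeyError, B raises KeyError
import Mathlib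
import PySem

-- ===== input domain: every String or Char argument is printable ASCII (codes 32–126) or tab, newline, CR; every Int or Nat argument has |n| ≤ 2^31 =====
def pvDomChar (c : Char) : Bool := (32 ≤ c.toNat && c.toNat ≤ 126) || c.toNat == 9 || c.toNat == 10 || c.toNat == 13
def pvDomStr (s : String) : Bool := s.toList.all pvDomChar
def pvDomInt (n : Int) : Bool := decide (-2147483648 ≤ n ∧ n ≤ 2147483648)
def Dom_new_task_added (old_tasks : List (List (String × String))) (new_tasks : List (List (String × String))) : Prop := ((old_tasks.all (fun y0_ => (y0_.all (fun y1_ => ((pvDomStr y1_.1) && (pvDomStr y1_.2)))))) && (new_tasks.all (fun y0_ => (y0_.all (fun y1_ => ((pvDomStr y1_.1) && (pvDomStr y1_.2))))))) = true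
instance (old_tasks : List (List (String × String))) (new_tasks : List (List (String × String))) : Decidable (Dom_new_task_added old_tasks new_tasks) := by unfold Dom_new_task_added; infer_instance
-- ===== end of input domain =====

-- B replaces A's two-sets-and-difference check by sorting both id lists and detecting an unmatched new id with a two-pointer merge scan (objective: alternative).


-- dict lookup task['task_file']: first matching key in the association list.
-- Total here with default ""; a missing key is Python's KeyError, excluded by Pre_.
def taskFile (task : List (String × String)) : String :=
  (((task.find? (fun p => p.1 == "task_file")).map (·.2)).getD "")

-- ===== PORT A =====
def new_task_added (old_tasks : List (List (String × String))) (new_tasks : List (List (String × String))) : Bool :=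
  let old_task_ids := old_tasks.map taskFile
  let new_task_ids := new_tasks.map taskFile
  let added := PySem.Set.diff (PySem.Set.ofList new_task_ids) (PySem.Set.ofList old_task_ids)
  if PySem.Set.len added > 0 then true else false

-- ===== PORT B =====
-- the inner `while i < len(old_ids) and old_ids[i] < nid: i += 1` loop of Source B
def advB (old : List String) (nid : String) (i : Nat) : Nat :=
  if h : i < old.length then
    if old[i] < nid then advB old nid (i + 1) else i
  else i
termination_by old.length - i

-- the `for nid in new_ids` loop of Source B, carrying the pointer i
def scanB (old : List String) (i : Nat) : List String → Bool
  | [] => false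
  | nid :: rest =>
      let i' := advB old nid i
      if i' = old.length ∨ old.getD i' "" ≠ nid then true
      else scanB old i' rest

def new_task_added_alt (old_tasks : List (List (String × String))) (new_tasks : List (List (String × String))) : Bool :=
  let old_ids := PySem.List.sorted (old_tasks.map taskFile) (fun x => x) false
  let new_ids := PySem.List.sorted (new_tasks.map taskFile) (fun x => x) false
  scanB old_ids 0 new_ids

-- ===== PRECONDITION & SPEC =====
-- Pre_ excludes inputs where some task dict lacks the key 'task_file': there A (and B) raise KeyError.
def Pre_new_task_added (old_tasks : List (List (String × String))) (new_tasks : List (List (String × String))) : Prop :=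
  (∀ t ∈ old_tasks, (t.find? (fun p => p.1 == "task_file")).isSome) ∧
  (∀ t ∈ new_tasks, (t.find? (fun p => p.1 == "task_file")).isSome)
instance (old_tasks : List (List (String × String))) (new_tasks : List (List (String × String))) : Decidable (Pre_new_task_added old_tasks new_tasks) := by unfold Pre_new_task_added; infer_instance

def pvWitness_new_task_added : (List (List (String × String))) × (List (List (String × String))) :=
  ([[("task_file", "a.json")]], [[("task_file", "b.json")], [("task_file", "a.json")]])

def Spec_new_task_added (old_tasks : List (List (String × String))) (new_tasks : List (List (String × String))) (out : Bool) : Prop := out = new_task_added_alt old_tasks new_tasks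
instance (old_tasks : List (List (String × String))) (new_tasks : List (List (String × String))) (out : Bool) : Decidable (Spec_new_task_added old_tasks new_tasks out) := by unfold Spec_new_task_added; infer_instance

-- ===== CLAIM (what is proved, stated in full; the proofs are below) =====
def Claim_equal_new_task_added : Prop := ∀ (old_tasks : List (List (String × String))) (new_tasks : List (List (String × String))), Dom_new_task_added old_tasks new_tasks → Pre_new_task_added old_tasks new_tasks → Spec_new_task_added old_tasks new_tasks (new_task_added old_tasks new_tasks)

-- ===== LEMMAS AND PROOFS =====

theorem le_advB (old : List String) (nid : String) (i : Nat) : i ≤ advB old nid i := by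
  rw [advB]
  split_ifs with h hlt
  · exact le_trans (Nat.le_succ i) (le_advB old nid (i + 1))
  · exact le_refl i
  · exact le_refl i
termination_by old.length - i
decreasing_by omega

theorem advB_le_length (old : List String) (nid : String) (i : Nat) (h : i ≤ old.length) :
    advB old nid i ≤ old.length := by
  rw [advB]
  split_ifs with h1 hlt
  · exact advB_le_length old nid (i + 1) h1
  · exact h
  · exact h
termination_by old.length - i
decreasing_by omega

theorem advB_skipped_lt (old : List String) (nid : String) (i : Nat)
    (hpre : ∀ j, j < i → old.getD j "" < nid) :
    ∀ j, j < advB old nid i → old.getD j "" < nid := by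
  rw [advB]
  split_ifs with h hlt
  · refine advB_skipped_lt old nid (i + 1) ?_
    intro j hj
    rcases Nat.lt_or_ge j i with hji | hji
    · exact hpre j hji
    · have hji' : j = i := by omega
      subst hji'
      rw [List.getD_eq_getElem old "" h]
      exact hlt
  · exact hpre
  · exact hpre
termination_by old.length - i
decreasing_by omega

theorem advB_stop (old : List String) (nid : String) (i : Nat)
    (h : advB old nid i < old.length) : ¬ old.getD (advB old nid i) "" < nid := by
  rw [advB] at h ⊢
  split_ifs at h ⊢ with h1 hlt
  · exact advB_stop old nid (i + 1) h
  · rw [List.getD_eq_getElem old "" h1]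
    exact hlt
  · exact absurd h h1
termination_by old.length - i
decreasing_by omega

theorem not_mem_of_getD_ne (old : List String) (x : String)
    (h : ∀ j, j < old.length → old.getD j "" ≠ x) : x ∉ old := by
  intro hm
  obtain ⟨j, hj, hje⟩ := List.mem_iff_getElem.mp hm
  exact h j hj (by rw [List.getD_eq_getElem old "" hj]; exact hje)

theorem scanB_true_iff (old : List String) (hold : old.Pairwise (· ≤ ·)) :
    ∀ (newL : List String) (i : Nat), i ≤ old.length → newL.Pairwise (· ≤ ·) →
    (∀ x ∈ newL, ∀ j, j < i → old.getD j "" < x) →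
    (scanB old i newL = true ↔ ∃ x ∈ newL, x ∉ old) := by
  intro newL
  induction newL with
  | nil => intro i _ _ _; simp [scanB]
  | cons nid rest ih =>
    intro i hi hpair hinv
    have hski : ∀ j, j < advB old nid i → old.getD j "" < nid :=
      advB_skipped_lt old nid i (fun j hj => hinv nid (by simp) j hj)
    have hi'le : advB old nid i ≤ old.length := advB_le_length old nid i hi
    rw [scanB]
    by_cases hb : advB old nid i = old.length ∨ old.getD (advB old nid i) "" ≠ nid
    · rw [if_pos hb]
      have hnm : nid ∉ old := by
        apply not_mem_of_getD_ne
        intro j hj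
        by_cases hlen : advB old nid i = old.length
        · exact ne_of_lt (hski j (by omega))
        · have hi'lt : advB old nid i < old.length := lt_of_le_of_ne hi'le hlen
          have hne : old.getD (advB old nid i) "" ≠ nid := by
            rcases hb with hb | hb
            · exact absurd hb hlen
            · exact hb
          have hgt : nid < old.getD (advB old nid i) "" :=
            lt_of_le_of_ne (not_lt.mp (advB_stop old nid i hi'lt)) (Ne.symm hne)
          rcases Nat.lt_or_ge j (advB old nid i) with hj' | hj'
          · exact ne_of_lt (hski j hj')
          · rcases Nat.eq_or_lt_of_le hj' with hj2 | hj2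
            · rw [hj2] at hne; exact hne
            · have hmono : old.getD (advB old nid i) "" ≤ old.getD j "" := by
                rw [List.getD_eq_getElem old "" hi'lt, List.getD_eq_getElem old "" hj]
                exact List.pairwise_iff_getElem.mp hold _ _ hi'lt hj hj2
              exact ne_of_gt (lt_of_lt_of_le hgt hmono)
      simp only [true_iff]
      exact ⟨nid, by simp, hnm⟩
    · rw [if_neg hb]
      obtain ⟨hlen, heq'⟩ := not_or.mp hb
      have heq := not_not.mp heq' 
      have hi'lt : advB old nid i < old.length := lt_of_le_of_ne hi'le hlen
      have hmem : nid ∈ old := by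
        rw [← heq, List.getD_eq_getElem old "" hi'lt]
        exact List.getElem_mem hi'lt
      rw [ih (advB old nid i) hi'le (List.Pairwise.of_cons hpair) ?_]
      · constructor
        · rintro ⟨x, hx, hxn⟩
          exact ⟨x, by simp [hx], hxn⟩
        · rintro ⟨x, hx, hxn⟩
          rcases List.mem_cons.mp hx with rfl | hx
          · exact absurd hmem hxn
          · exact ⟨x, hx, hxn⟩
      · intro x hx j hj
        have h1 : old.getD j "" < nid := hski j hj
        have h2 : nid ≤ x := (List.pairwise_cons.mp hpair).1 x hx
        exact lt_of_lt_of_le h1 h2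

theorem new_task_added_eq_alt (old_tasks new_tasks : List (List (String × String))) :
    new_task_added old_tasks new_tasks = new_task_added_alt old_tasks new_tasks := by
  unfold new_task_added new_task_added_alt
  have hold : (PySem.List.sorted (old_tasks.map taskFile) (fun x => x) false).Pairwise (· ≤ ·) :=
    PySem.List.sorted_pairwise (old_tasks.map taskFile) (fun x => x)
  have hnew : (PySem.List.sorted (new_tasks.map taskFile) (fun x => x) false).Pairwise (· ≤ ·) :=
    PySem.List.sorted_pairwise (new_tasks.map taskFile) (fun x => x)
  have hB := scanB_true_iff (PySem.List.sorted (old_tasks.map taskFile) (fun x => x) false) hold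
      (PySem.List.sorted (new_tasks.map taskFile) (fun x => x) false) 0 (Nat.zero_le _) hnew
      (by intro x _ j hj; omega)
  rw [Bool.eq_iff_iff, hB]
  dsimp only [PySem.Set.len]
  constructor
  · intro h
    split_ifs at h with hpos
    · have hpos' : 0 < (PySem.Set.diff (PySem.Set.ofList (new_tasks.map taskFile)) (PySem.Set.ofList (old_tasks.map taskFile))).length := by
        exact_mod_cast hpos
      obtain ⟨x, hx⟩ := List.exists_mem_of_length_pos hpos'
      rw [PySem.Set.mem_diff] at hx
      obtain ⟨hxn, hxo⟩ := hx
      rw [PySem.Set.mem_ofList] at hxn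
      refine ⟨x, ?_, ?_⟩
      · rw [PySem.List.mem_sorted]; exact hxn
      · rw [PySem.List.mem_sorted]
        intro hc
        exact hxo ((PySem.Set.mem_ofList _ _).mpr hc)
  · rintro ⟨x, hx, hxo⟩
    rw [PySem.List.mem_sorted] at hx
    rw [PySem.List.mem_sorted] at hxo
    have hmem : x ∈ PySem.Set.diff (PySem.Set.ofList (new_tasks.map taskFile)) (PySem.Set.ofList (old_tasks.map taskFile)) := by
      rw [PySem.Set.mem_diff]
      exact ⟨(PySem.Set.mem_ofList _ _).mpr hx, fun hmo => hxo ((PySem.Set.mem_ofList _ _).mp hmo)⟩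
    have hpos := List.length_pos_of_mem hmem
    simp [hpos]

-- ===== VERDICT (by name: the statement is the Claim_ definition above) =====
theorem new_task_added_spec : Claim_equal_new_task_added := by
  intro old_tasks new_tasks _ _
  exact new_task_added_eq_alt old_tasks new_tasks
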